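-- pv_equiv track=rewrite | github.com/rlamsal1256/rupak-learns | utils/hugo_converter.py | transform_to_hugo_content
-- ===== SOURCE A (Python) =====
-- def transform_to_hugo_content(draft_content):
--     """
--     Transform draft format to Hugo-friendly format.
--
--     Converts:
--     ## Highlight 1
--     > Quote text
--
--     Commentary text
--
--     To:
--     ## Section Title
--
--     > Quote text
--
--     **My thoughts:** Commentary text
--     """
--     lines = draft_content.split('\n')
--     hugo_lines = []
--     section_count = 1
--     current_section_title = None
--     in_quote = False
--     quote_buffer = []
--     commentary_buffer = []
--
--     for i, line in enumerate(lines):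
--         if line.startswith('## Highlight'):
--             # Flush previous section
--             if quote_buffer or commentary_buffer:
--                 if current_section_title:
--                     hugo_lines.append(current_section_title)
--                     hugo_lines.append('')
--
--                 if quote_buffer:
--                     hugo_lines.extend(quote_buffer)
--                     hugo_lines.append('')
--
--                 if commentary_buffer:
--                     hugo_lines.append(f"**My thoughts:** {commentary_buffer[0]}")
--                     hugo_lines.extend(commentary_buffer[1:])
--                     hugo_lines.append('')
--
--                 hugo_lines.append('---')
--                 hugo_lines.append('')
--
--                 quote_buffer = []
--                 commentary_buffer = []
--
--             current_section_title = f"## Key Insight {section_count}"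
--             section_count += 1
--             in_quote = False
--
--         elif line.startswith('>'):
--             quote_buffer.append(line)
--             in_quote = True
--
--         elif line.strip() == '':
--             if in_quote:
--                 in_quote = False
--
--         else:
--             if not in_quote and line.strip():
--                 commentary_buffer.append(line)
--
--     # Flush last section
--     if quote_buffer or commentary_buffer:
--         if current_section_title:
--             hugo_lines.append(current_section_title)
--             hugo_lines.append('')
--
--         if quote_buffer:
--             hugo_lines.extend(quote_buffer)
--             hugo_lines.append('')
--
--         if commentary_buffer:
--             hugo_lines.append(f"**My thoughts:** {commentary_buffer[0]}")
--             hugo_lines.extend(commentary_buffer[1:])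
--
--     return '\n'.join(hugo_lines).strip()
-- ===== SOURCE B (Python) =====
-- def _extract(seg):
--     # per-segment quote/commentary extraction (same in_quote rule as the draft format)
--     quotes, comm, in_quote = [], [], False
--     for line in seg:
--         if line.startswith('>'):
--             quotes.append(line)
--             in_quote = True
--         elif line.strip() == '':
--             in_quote = False
--         elif not in_quote:
--             comm.append(line)
--     return quotes, comm
--
--
-- def _render(title, quotes, comm, last):
--     # render one non-empty segment; the final segment omits the trailing separators
--     if not quotes and not comm:
--         return []
--     out = []
--     if title is not None:
--         out.append(title)
--         out.append('')
--     if quotes: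
--         out.extend(quotes)
--         out.append('')
--     if comm:
--         out.append("**My thoughts:** " + comm[0])
--         out.extend(comm[1:])
--         if not last:
--             out.append('')
--     if not last:
--         out.append('---')
--         out.append('')
--     return out
--
--
-- def transform_to_hugo_content(draft_content):
--     # Phase 1: cut the draft into segments at each '## Highlight' line
--     segments = [[]]
--     for line in draft_content.split('\n'):
--         if line.startswith('## Highlight'):
--             segments.append([])
--         else:
--             segments[-1].append(line)
--     # Phase 2: render each segment; segment k (k >= 1) is titled 'Key Insight k'
--     out = []
--     title = None
--     n = 1
--     last_idx = len(segments) - 1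
--     for idx, seg in enumerate(segments):
--         quotes, comm = _extract(seg)
--         out.extend(_render(title, quotes, comm, idx == last_idx))
--         title = "## Key Insight " + str(n)
--         n += 1
--     return '\n'.join(out).strip()
-- ===== Notes on version B (the rewrite author's own statement) =====
-- stated objective: alternative
-- what changed: A interleaves parsing and output in one pass with a lagging flush-on-next-heading; B first cuts the draft into segments at the highlight heading lines, then extracts quotes/commentary per segment and renders each segment with a single helper that knows whether it is the last.
import Mathlib
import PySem

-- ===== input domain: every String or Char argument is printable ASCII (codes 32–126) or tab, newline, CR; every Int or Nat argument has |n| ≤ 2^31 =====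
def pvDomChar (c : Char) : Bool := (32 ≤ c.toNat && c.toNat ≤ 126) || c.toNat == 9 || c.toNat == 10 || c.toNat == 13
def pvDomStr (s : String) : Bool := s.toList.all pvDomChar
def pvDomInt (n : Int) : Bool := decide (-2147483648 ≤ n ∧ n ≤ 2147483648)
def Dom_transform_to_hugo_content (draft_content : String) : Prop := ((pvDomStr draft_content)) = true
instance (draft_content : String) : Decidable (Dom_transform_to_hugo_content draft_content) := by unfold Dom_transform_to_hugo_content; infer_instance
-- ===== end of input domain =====

-- B reorganises A's single lagging-flush pass into two phases: segmentation at '## Highlight'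
-- lines, then per-segment extraction and rendering (objective: alternative decomposition).

-- ===== PORT A =====
-- A's loop state: (hugo_lines, section_count, current_section_title, in_quote, quote_buffer, commentary_buffer)
def pvStepA (st : List String × Int × Option String × Bool × List String × List String)
    (line : String) : List String × Int × Option String × Bool × List String × List String :=
  match st with
  | (hugo, n, title, inq, q, c) =>
    if PySem.Str.startswith line "## Highlight" then
      let hugo :=
        if q ≠ [] ∨ c ≠ [] then
          let h1 := match title with | some t => hugo ++ [t, ""] | none => hugo
          let h2 := if q ≠ [] then h1 ++ q ++ [""] else h1
          let h3 := match c with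
            | [] => h2
            | c0 :: rest => h2 ++ ("**My thoughts:** " ++ c0) :: rest ++ [""]
          h3 ++ ["---", ""]
        else hugo
      (hugo, n + 1, some ("## Key Insight " ++ PySem.Int.toStr n), false, [], [])
    else if PySem.Str.startswith line ">" then
      (hugo, n, title, true, q ++ [line], c)
    else if PySem.Str.strip line = "" then
      (hugo, n, title, false, q, c)   -- 'if in_quote: in_quote = False' leaves in_quote False either way
    else
      if inq = false ∧ PySem.Str.strip line ≠ "" then (hugo, n, title, inq, q, c ++ [line])
      else (hugo, n, title, inq, q, c)

-- A's final flush block ('Flush last section'), on the loop's final state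
def pvFlushEndA (st : List String × Int × Option String × Bool × List String × List String) :
    List String :=
  let hugo := st.1
  let title := st.2.2.1
  let q := st.2.2.2.2.1
  let c := st.2.2.2.2.2
  if q ≠ [] ∨ c ≠ [] then
    let h1 := match title with | some t => hugo ++ [t, ""] | none => hugo
    let h2 := if q ≠ [] then h1 ++ q ++ [""] else h1
    match c with
    | [] => h2
    | c0 :: rest => h2 ++ ("**My thoughts:** " ++ c0) :: rest
  else hugo

def transform_to_hugo_content (draft_content : String) : String :=
  PySem.Str.strip (PySem.Str.join "\n"
    (pvFlushEndA (((PySem.Chars.splitOn draft_content.toList ['\n']).map String.ofList).foldl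
      pvStepA ([], 1, none, false, [], []))))

-- ===== PORT B =====
-- Source B _extract: per-segment (quotes, commentary, in_quote) step
def pvExtractStep (st : List String × List String × Bool) (line : String) :
    List String × List String × Bool :=
  match st with
  | (qs, cm, inq) =>
    if PySem.Str.startswith line ">" then (qs ++ [line], cm, true)
    else if PySem.Str.strip line = "" then (qs, cm, false)
    else if inq then (qs, cm, inq)
    else (qs, cm ++ [line], inq)

def pvExtract (seg : List String) : List String × List String :=
  ((seg.foldl pvExtractStep ([], [], false)).1, (seg.foldl pvExtractStep ([], [], false)).2.1)

-- Source B _render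
def pvRender (title : Option String) (q c : List String) (last : Bool) : List String :=
  if q = [] ∧ c = [] then []
  else
    (match title with | some t => [t, ""] | none => []) ++
    (if q = [] then [] else q ++ [""]) ++
    (match c with
     | [] => []
     | c0 :: rest => ("**My thoughts:** " ++ c0) :: rest ++ (if last then [] else [""])) ++
    (if last then [] else ["---", ""])

-- Source B phase 1: segmentation fold (segments[:-1], current segment)
def pvSegStep (st : List (List String) × List String) (line : String) :
    List (List String) × List String :=
  if PySem.Str.startswith line "## Highlight" then (st.1 ++ [st.2], [])
  else (st.1, st.2 ++ [line])

-- Source B phase 2: render loop carrying (n, lagging title); the singleton case is the last segment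
def pvRenderAll (n : Int) (title : Option String) : List (List String) → List String
  | [] => []
  | [s] => pvRender title (pvExtract s).1 (pvExtract s).2 true
  | s :: s' :: rest =>
      pvRender title (pvExtract s).1 (pvExtract s).2 false ++
      pvRenderAll (n + 1) (some ("## Key Insight " ++ PySem.Int.toStr n)) (s' :: rest)

def transform_to_hugo_content_alt (draft_content : String) : String :=
  PySem.Str.strip (PySem.Str.join "\n" (pvRenderAll 1 none
    ((((PySem.Chars.splitOn draft_content.toList ['\n']).map String.ofList).foldl pvSegStep ([], [])).1 ++
     [(((PySem.Chars.splitOn draft_content.toList ['\n']).map String.ofList).foldl pvSegStep ([], [])).2])))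

-- ===== PRECONDITION & SPEC =====
def Spec_transform_to_hugo_content (draft_content : String) (out : String) : Prop := out = transform_to_hugo_content_alt draft_content
instance (draft_content : String) (out : String) : Decidable (Spec_transform_to_hugo_content draft_content out) := by unfold Spec_transform_to_hugo_content; infer_instance

-- ===== CLAIM (what is proved, stated in full; the proofs are below) =====
def Claim_equal_transform_to_hugo_content : Prop := ∀ (draft_content : String), Dom_transform_to_hugo_content draft_content → Spec_transform_to_hugo_content draft_content (transform_to_hugo_content draft_content)

-- ===== LEMMAS AND PROOFS =====

-- recursive view of B's segmentation
def pvSegs : List String → List (List String)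
  | [] => [[]]
  | l :: L =>
    if PySem.Str.startswith l "## Highlight" then [] :: pvSegs L
    else
      match pvSegs L with
      | [] => [[l]]
      | s :: rest => (l :: s) :: rest

lemma pvSegs_ne_nil (L : List String) : pvSegs L ≠ [] := by
  cases L with
  | nil => simp [pvSegs]
  | cons l L =>
    simp only [pvSegs]
    split
    · simp
    · rcases h : pvSegs L with _ | ⟨s, rest⟩ <;> simp

lemma pvSeg_fold (L : List String) : ∀ (done : List (List String)) (cur : List String),
    (L.foldl pvSegStep (done, cur)).1 ++ [(L.foldl pvSegStep (done, cur)).2]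
      = done ++ (cur ++ (pvSegs L).headI) :: (pvSegs L).tail := by
  induction L with
  | nil => intro done cur; simp [pvSegs]
  | cons l L ih =>
    intro done cur
    by_cases h : PySem.Str.startswith l "## Highlight" = true
    · rcases hs : pvSegs L with _ | ⟨s, rest⟩
      · exact absurd hs (pvSegs_ne_nil L)
      · simp only [List.foldl_cons, pvSegStep, h, if_true, pvSegs]
        rw [ih (done ++ [cur]) []]
        simp [hs]
    · rcases hs : pvSegs L with _ | ⟨s, rest⟩
      · exact absurd hs (pvSegs_ne_nil L)
      · simp only [List.foldl_cons, pvSegStep, h, if_false, Bool.false_eq_true, pvSegs]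
        rw [ih done (cur ++ [l])]
        simp [hs]

-- proof-side generalisation of pvRenderAll with an in-flight extraction state on the first segment
def pvRenderCont (n : Int) (title : Option String) (st : List String × List String × Bool) :
    List (List String) → List String
  | [] => []
  | [s] => pvRender title (s.foldl pvExtractStep st).1 (s.foldl pvExtractStep st).2.1 true
  | s :: s' :: rest =>
      pvRender title (s.foldl pvExtractStep st).1 (s.foldl pvExtractStep st).2.1 false ++
      pvRenderCont (n + 1) (some ("## Key Insight " ++ PySem.Int.toStr n)) ([], [], false) (s' :: rest)

lemma pvRenderCont_fresh (segs : List (List String)) : ∀ (n : Int) (title : Option String),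
    pvRenderCont n title ([], [], false) segs = pvRenderAll n title segs := by
  induction segs with
  | nil => intro n title; rfl
  | cons s rest ih =>
    intro n title
    cases rest with
    | nil => rfl
    | cons s' rest' => simp only [pvRenderCont, pvRenderAll, pvExtract, ih]

lemma pvRenderCont_step (n : Int) (title : Option String) (st : List String × List String × Bool)
    (l : String) (s : List String) (rest : List (List String)) :
    pvRenderCont n title st ((l :: s) :: rest)
      = pvRenderCont n title (pvExtractStep st l) (s :: rest) := by
  cases rest <;> simp only [pvRenderCont, List.foldl_cons]

-- the final flush is exactly a last-segment render
lemma pvFlushEnd_eq_render (hugo : List String) (n : Int) (title : Option String) (inq : Bool)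
    (q c : List String) :
    pvFlushEndA (hugo, n, title, inq, q, c) = hugo ++ pvRender title q c true := by
  simp only [pvFlushEndA, pvRender]
  by_cases hq : q = [] <;> by_cases hc : c = []
  · simp [hq, hc]
  · rcases c with _ | ⟨c0, rest⟩
    · simp at hc
    · cases title <;> simp [hq]
  · rcases c with _ | ⟨c0, rest⟩ <;> cases title <;> simp [hq, hc]
  · rcases c with _ | ⟨c0, rest⟩
    · simp at hc
    · cases title <;> simp [hq]

-- the mid-loop flush is exactly a non-last-segment render
lemma pvFlushMid_eq_render (hugo : List String) (title : Option String) (q c : List String) :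
    (if q ≠ [] ∨ c ≠ [] then
      let h1 := match title with | some t => hugo ++ [t, ""] | none => hugo
      let h2 := if q ≠ [] then h1 ++ q ++ [""] else h1
      let h3 := match c with
        | [] => h2
        | c0 :: rest => h2 ++ ("**My thoughts:** " ++ c0) :: rest ++ [""]
      h3 ++ ["---", ""]
    else hugo) = hugo ++ pvRender title q c false := by
  simp only [pvRender]
  by_cases hq : q = [] <;> by_cases hc : c = []
  · simp [hq, hc]
  · rcases c with _ | ⟨c0, rest⟩
    · simp at hc
    · cases title <;> simp [hq]
  · rcases c with _ | ⟨c0, rest⟩ <;> cases title <;> simp [hq, hc]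
  · rcases c with _ | ⟨c0, rest⟩
    · simp at hc
    · cases title <;> simp [hq]

lemma pvMain (L : List String) : ∀ (hugo : List String) (n : Int) (title : Option String)
    (inq : Bool) (q c : List String),
    pvFlushEndA (L.foldl pvStepA (hugo, n, title, inq, q, c))
      = hugo ++ pvRenderCont n title (q, c, inq) (pvSegs L) := by
  induction L with
  | nil =>
    intro hugo n title inq q c
    simp only [List.foldl_nil, pvSegs, pvRenderCont, List.foldl_nil]
    exact pvFlushEnd_eq_render hugo n title inq q c
  | cons l L ih =>
    intro hugo n title inq q c
    by_cases h : PySem.Str.startswith l "## Highlight" = true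
    · rcases hs : pvSegs L with _ | ⟨s, rest⟩
      · exact absurd hs (pvSegs_ne_nil L)
      · simp only [List.foldl_cons, pvStepA, h, if_true]
        rw [ih]
        simp only [pvSegs, h, if_true, hs, pvRenderCont, List.foldl_nil]
        rw [pvFlushMid_eq_render hugo title q c, List.append_assoc]
    · have hstep : pvStepA (hugo, n, title, inq, q, c) l
          = (hugo, n, title, (pvExtractStep (q, c, inq) l).2.2,
             (pvExtractStep (q, c, inq) l).1, (pvExtractStep (q, c, inq) l).2.1) := by
        unfold pvStepA pvExtractStep
        cases inq <;> split_ifs <;> simp_all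
      rcases hs : pvSegs L with _ | ⟨s, rest⟩
      · exact absurd hs (pvSegs_ne_nil L)
      · simp only [List.foldl_cons, hstep]
        rw [ih]
        simp only [pvSegs, h, if_false, Bool.false_eq_true, hs]
        rw [pvRenderCont_step]

-- ===== VERDICT (by name: the statement is the Claim_ definition above) =====
theorem transform_to_hugo_content_spec : Claim_equal_transform_to_hugo_content := by
  intro draft_content _
  unfold Spec_transform_to_hugo_content transform_to_hugo_content transform_to_hugo_content_alt
  have hseg := pvSeg_fold ((PySem.Chars.splitOn draft_content.toList ['\n']).map String.ofList) [] []
  simp only [List.nil_append] at hseg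
  rw [hseg]
  have hmain := pvMain ((PySem.Chars.splitOn draft_content.toList ['\n']).map String.ofList) [] 1 none false [] []
  rw [hmain, pvRenderCont_fresh]
  rcases h : pvSegs ((PySem.Chars.splitOn draft_content.toList ['\n']).map String.ofList) with _ | ⟨s, rest⟩
  · exact absurd h (pvSegs_ne_nil _)
  · simp
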